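-- pv_equiv track=rewrite | github.com/Sammjjj/TCDOC_EXTRACT | create_comprehensive_summary_multi_institution.py | format_composite_flow
-- ===== SOURCE A (Python) =====
-- def format_composite_flow(comp_dict):
--     """Format composite flow dictionary as compact string."""
--     if not comp_dict:
--         return "—"
--
--     # Prioritize showing the most meaningful codes
--     priority = ['GC', 'GR', 'GS', 'AC', 'AR', 'AS', 'RC', 'RR', 'RS']
--     parts = []
--
--     for code in priority:
--         if comp_dict.get(code, 0) > 0:
--             parts.append(f"{code}{comp_dict[code]}")
--
--     # Add any other codes not in priority list
--     for code, count in comp_dict.items():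
--         if code not in priority and count > 0:
--             parts.append(f"{code}{count}")
--
--     return ' '.join(parts[:6])  # Limit to 6 codes for readability
-- ===== SOURCE B (Python) =====
-- def format_composite_flow(comp_dict):
--     """Format composite flow dictionary as compact string."""
--     if not comp_dict:
--         return "—"
--
--     priority = ['GC', 'GR', 'GS', 'AC', 'AR', 'AS', 'RC', 'RR', 'RS']
--     rank = {code: i for i, code in enumerate(priority)}
--
--     # One pass: drop each positive entry into the bucket of its rank
--     # (bucket 9 collects the non-priority codes, in insertion order).
--     buckets = [[] for _ in range(10)]
--     for code, count in comp_dict.items():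
--         if count > 0:
--             buckets[rank.get(code, 9)].append(f"{code}{count}")
--
--     parts = [part for bucket in buckets for part in bucket]
--     return ' '.join(parts[:6])
-- ===== Notes on version B (the rewrite author's own statement) =====
-- stated objective: alternative
-- what changed: B replaces A's two phases (nine per-priority-code dict lookups, then a second scan for the remaining codes) with a single pass over the dict that drops each positive entry into one of ten rank buckets (rank map + bucket dispatch), then flattens the buckets; Pre_ excludes association lists with duplicate keys, which no Python dict can represent.
import Mathlib
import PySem

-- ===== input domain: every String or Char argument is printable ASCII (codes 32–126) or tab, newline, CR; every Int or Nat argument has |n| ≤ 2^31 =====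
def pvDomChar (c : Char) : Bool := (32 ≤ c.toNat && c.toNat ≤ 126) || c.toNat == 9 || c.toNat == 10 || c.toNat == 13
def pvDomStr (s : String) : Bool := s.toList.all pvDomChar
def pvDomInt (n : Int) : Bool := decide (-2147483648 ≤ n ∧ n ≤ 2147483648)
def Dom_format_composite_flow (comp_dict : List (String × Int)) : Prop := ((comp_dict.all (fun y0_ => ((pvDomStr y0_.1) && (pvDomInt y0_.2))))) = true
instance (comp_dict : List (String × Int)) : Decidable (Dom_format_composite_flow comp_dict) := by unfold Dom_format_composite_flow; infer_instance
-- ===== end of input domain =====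

-- B replaces A's nine per-code dict lookups followed by a second scan with a single
-- pass that drops each positive entry into one of ten rank buckets (alternative
-- decomposition; equivalence proved on the return value only — neither mutates its input).

-- ===== PORT A =====
def fcfPriority : List String := ["GC","GR","GS","AC","AR","AS","RC","RR","RS"]

def fcfAStep1 (d : PySem.Dict String Int) (parts : List String) (code : String) : List String :=
  if d.getD code 0 > 0 then parts ++ [code ++ PySem.Int.toStr (d.getD code 0)] else parts

def fcfAStep2 (parts : List String) (p : String × Int) : List String :=
  if p.1 ∉ fcfPriority ∧ p.2 > 0 then parts ++ [p.1 ++ PySem.Int.toStr p.2] else parts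

def format_composite_flow (comp_dict : List (String × Int)) : String :=
  if comp_dict = [] then "—"
  else
    PySem.Str.join " "
      ((comp_dict.foldl fcfAStep2
        (fcfPriority.foldl (fcfAStep1 (PySem.Dict.mk comp_dict)) [])).take 6)

-- ===== PORT B =====
-- rank = {code: i for i, code in enumerate(priority)}
def fcfRank : PySem.Dict String Int :=
  PySem.Dict.mk ((PySem.List.enumerate fcfPriority).map (fun p => (p.2, p.1)))

-- loop body: if count > 0: buckets[rank.get(code, 9)].append(f"{code}{count}")
-- (rank.get(...) is 0..9, so .toNat is exact here: the index is never negative)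
def fcfBStep (bs : List (List String)) (p : String × Int) : List (List String) :=
  if p.2 > 0 then
    let r := (fcfRank.getD p.1 9).toNat
    bs.set r (bs.getD r [] ++ [p.1 ++ PySem.Int.toStr p.2])
  else bs

def format_composite_flow_alt (comp_dict : List (String × Int)) : String :=
  if comp_dict = [] then "—"
  else
    PySem.Str.join " "
      (((comp_dict.foldl fcfBStep (List.replicate 10 [])).flatten).take 6)

-- ===== PRECONDITION & SPEC =====
-- Pre_ excludes association lists with duplicate keys, which no Python dict can
-- represent (A's first-match lookup vs B's per-occurrence buckets would both be
-- accidental readings of such a list).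
def Pre_format_composite_flow (comp_dict : List (String × Int)) : Prop :=
  (comp_dict.map Prod.fst).Nodup
instance (comp_dict : List (String × Int)) : Decidable (Pre_format_composite_flow comp_dict) := by
  unfold Pre_format_composite_flow; infer_instance

def pvWitness_format_composite_flow : (List (String × Int)) := [("GC", 2), ("XX", 1), ("AR", 0)]

def Spec_format_composite_flow (comp_dict : List (String × Int)) (out : String) : Prop :=
  out = format_composite_flow_alt comp_dict
instance (comp_dict : List (String × Int)) (out : String) : Decidable (Spec_format_composite_flow comp_dict out) := by
  unfold Spec_format_composite_flow; infer_instance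

-- ===== CLAIM (what is proved, stated in full; the proofs are below) =====
def Claim_equal_format_composite_flow : Prop := ∀ (comp_dict : List (String × Int)), Dom_format_composite_flow comp_dict → Pre_format_composite_flow comp_dict → Spec_format_composite_flow comp_dict (format_composite_flow comp_dict)

-- ===== LEMMAS AND PROOFS =====
def fcfFmt (p : String × Int) : String := p.1 ++ PySem.Int.toStr p.2

def fcfRkN (c : String) : Nat := (fcfRank.getD c 9).toNat

-- bucket i's contents after B's pass
def fcfG (i : Nat) (xs : List (String × Int)) : List String :=
  (xs.filter (fun p => decide (p.2 > 0) && decide (fcfRkN p.1 = i))).map fcfFmt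

lemma fcfRank_eq : fcfRank = PySem.Dict.mk [("GC",0),("GR",1),("GS",2),("AC",3),("AR",4),("AS",5),("RC",6),("RR",7),("RS",8)] := by
  rfl

lemma fcfRkN_eq (c : String) : fcfRkN c =
    if c = "GC" then 0 else if c = "GR" then 1 else if c = "GS" then 2 else
    if c = "AC" then 3 else if c = "AR" then 4 else if c = "AS" then 5 else
    if c = "RC" then 6 else if c = "RR" then 7 else if c = "RS" then 8 else 9 := by
  unfold fcfRkN
  rw [fcfRank_eq]
  by_cases h1 : c = "GC"; · subst h1; decide
  by_cases h2 : c = "GR"; · subst h2; decide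
  by_cases h3 : c = "GS"; · subst h3; decide
  by_cases h4 : c = "AC"; · subst h4; decide
  by_cases h5 : c = "AR"; · subst h5; decide
  by_cases h6 : c = "AS"; · subst h6; decide
  by_cases h7 : c = "RC"; · subst h7; decide
  by_cases h8 : c = "RR"; · subst h8; decide
  by_cases h9 : c = "RS"; · subst h9; decide
  have g1 : ¬("GC" = c) := fun h => h1 h.symm
  have g2 : ¬("GR" = c) := fun h => h2 h.symm
  have g3 : ¬("GS" = c) := fun h => h3 h.symm
  have g4 : ¬("AC" = c) := fun h => h4 h.symm
  have g5 : ¬("AR" = c) := fun h => h5 h.symm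
  have g6 : ¬("AS" = c) := fun h => h6 h.symm
  have g7 : ¬("RC" = c) := fun h => h7 h.symm
  have g8 : ¬("RR" = c) := fun h => h8 h.symm
  have g9 : ¬("RS" = c) := fun h => h9 h.symm
  simp [PySem.Dict.getD, PySem.Dict.get?, g1, g2, g3, g4, g5, g6, g7, g8, g9,
        h1, h2, h3, h4, h5, h6, h7, h8, h9]

lemma fcfRkN_cases (c : String) :
    fcfRkN c = 0 ∨ fcfRkN c = 1 ∨ fcfRkN c = 2 ∨ fcfRkN c = 3 ∨ fcfRkN c = 4 ∨
    fcfRkN c = 5 ∨ fcfRkN c = 6 ∨ fcfRkN c = 7 ∨ fcfRkN c = 8 ∨ fcfRkN c = 9 := by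
  rw [fcfRkN_eq]; split_ifs <;> simp

lemma fcfG_cons (i : Nat) (p : String × Int) (xs : List (String × Int)) :
    fcfG i (p :: xs) = (if p.2 > 0 ∧ fcfRkN p.1 = i then [fcfFmt p] else []) ++ fcfG i xs := by
  simp only [fcfG, List.filter_cons]
  split_ifs with h <;> simp_all

lemma fcf_bfold (xs : List (String × Int)) :
    ∀ b0 b1 b2 b3 b4 b5 b6 b7 b8 b9 : List String,
    xs.foldl fcfBStep [b0,b1,b2,b3,b4,b5,b6,b7,b8,b9] =
      [b0 ++ fcfG 0 xs, b1 ++ fcfG 1 xs, b2 ++ fcfG 2 xs, b3 ++ fcfG 3 xs,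
       b4 ++ fcfG 4 xs, b5 ++ fcfG 5 xs, b6 ++ fcfG 6 xs, b7 ++ fcfG 7 xs,
       b8 ++ fcfG 8 xs, b9 ++ fcfG 9 xs] := by
  induction xs with
  | nil => intro b0 b1 b2 b3 b4 b5 b6 b7 b8 b9; simp [fcfG]
  | cons p xs ih =>
    intro b0 b1 b2 b3 b4 b5 b6 b7 b8 b9
    by_cases hp : p.2 > 0
    · rcases fcfRkN_cases p.1 with h|h|h|h|h|h|h|h|h|h
      · have hb : fcfBStep [b0,b1,b2,b3,b4,b5,b6,b7,b8,b9] p = [b0 ++ [p.1 ++ PySem.Int.toStr p.2], b1, b2, b3, b4, b5, b6, b7, b8, b9] := by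
          simp only [fcfBStep, if_pos hp]
          rw [show (fcfRank.getD p.1 9).toNat = 0 from h]
          rfl
        rw [List.foldl_cons, hb, ih]
        simp [fcfG_cons, h, hp, fcfFmt]
      · have hb : fcfBStep [b0,b1,b2,b3,b4,b5,b6,b7,b8,b9] p = [b0, b1 ++ [p.1 ++ PySem.Int.toStr p.2], b2, b3, b4, b5, b6, b7, b8, b9] := by
          simp only [fcfBStep, if_pos hp]
          rw [show (fcfRank.getD p.1 9).toNat = 1 from h]
          rfl
        rw [List.foldl_cons, hb, ih]
        simp [fcfG_cons, h, hp, fcfFmt]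
      · have hb : fcfBStep [b0,b1,b2,b3,b4,b5,b6,b7,b8,b9] p = [b0, b1, b2 ++ [p.1 ++ PySem.Int.toStr p.2], b3, b4, b5, b6, b7, b8, b9] := by
          simp only [fcfBStep, if_pos hp]
          rw [show (fcfRank.getD p.1 9).toNat = 2 from h]
          rfl
        rw [List.foldl_cons, hb, ih]
        simp [fcfG_cons, h, hp, fcfFmt]
      · have hb : fcfBStep [b0,b1,b2,b3,b4,b5,b6,b7,b8,b9] p = [b0, b1, b2, b3 ++ [p.1 ++ PySem.Int.toStr p.2], b4, b5, b6, b7, b8, b9] := by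
          simp only [fcfBStep, if_pos hp]
          rw [show (fcfRank.getD p.1 9).toNat = 3 from h]
          rfl
        rw [List.foldl_cons, hb, ih]
        simp [fcfG_cons, h, hp, fcfFmt]
      · have hb : fcfBStep [b0,b1,b2,b3,b4,b5,b6,b7,b8,b9] p = [b0, b1, b2, b3, b4 ++ [p.1 ++ PySem.Int.toStr p.2], b5, b6, b7, b8, b9] := by
          simp only [fcfBStep, if_pos hp]
          rw [show (fcfRank.getD p.1 9).toNat = 4 from h]
          rfl
        rw [List.foldl_cons, hb, ih]
        simp [fcfG_cons, h, hp, fcfFmt]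
      · have hb : fcfBStep [b0,b1,b2,b3,b4,b5,b6,b7,b8,b9] p = [b0, b1, b2, b3, b4, b5 ++ [p.1 ++ PySem.Int.toStr p.2], b6, b7, b8, b9] := by
          simp only [fcfBStep, if_pos hp]
          rw [show (fcfRank.getD p.1 9).toNat = 5 from h]
          rfl
        rw [List.foldl_cons, hb, ih]
        simp [fcfG_cons, h, hp, fcfFmt]
      · have hb : fcfBStep [b0,b1,b2,b3,b4,b5,b6,b7,b8,b9] p = [b0, b1, b2, b3, b4, b5, b6 ++ [p.1 ++ PySem.Int.toStr p.2], b7, b8, b9] := by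
          simp only [fcfBStep, if_pos hp]
          rw [show (fcfRank.getD p.1 9).toNat = 6 from h]
          rfl
        rw [List.foldl_cons, hb, ih]
        simp [fcfG_cons, h, hp, fcfFmt]
      · have hb : fcfBStep [b0,b1,b2,b3,b4,b5,b6,b7,b8,b9] p = [b0, b1, b2, b3, b4, b5, b6, b7 ++ [p.1 ++ PySem.Int.toStr p.2], b8, b9] := by
          simp only [fcfBStep, if_pos hp]
          rw [show (fcfRank.getD p.1 9).toNat = 7 from h]
          rfl
        rw [List.foldl_cons, hb, ih]
        simp [fcfG_cons, h, hp, fcfFmt]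
      · have hb : fcfBStep [b0,b1,b2,b3,b4,b5,b6,b7,b8,b9] p = [b0, b1, b2, b3, b4, b5, b6, b7, b8 ++ [p.1 ++ PySem.Int.toStr p.2], b9] := by
          simp only [fcfBStep, if_pos hp]
          rw [show (fcfRank.getD p.1 9).toNat = 8 from h]
          rfl
        rw [List.foldl_cons, hb, ih]
        simp [fcfG_cons, h, hp, fcfFmt]
      · have hb : fcfBStep [b0,b1,b2,b3,b4,b5,b6,b7,b8,b9] p = [b0, b1, b2, b3, b4, b5, b6, b7, b8, b9 ++ [p.1 ++ PySem.Int.toStr p.2]] := by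
          simp only [fcfBStep, if_pos hp]
          rw [show (fcfRank.getD p.1 9).toNat = 9 from h]
          rfl
        rw [List.foldl_cons, hb, ih]
        simp [fcfG_cons, h, hp, fcfFmt]
    · have hb : fcfBStep [b0,b1,b2,b3,b4,b5,b6,b7,b8,b9] p = [b0,b1,b2,b3,b4,b5,b6,b7,b8,b9] := by
        simp [fcfBStep, hp]
      rw [List.foldl_cons, hb, ih]
      simp [fcfG_cons, hp]

-- A's first-loop contribution for one code, as the if-expression it appends
def fcfE (d : PySem.Dict String Int) (code : String) : List String :=
  if d.getD code 0 > 0 then [code ++ PySem.Int.toStr (d.getD code 0)] else []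

lemma fcfAStep1_eq (d : PySem.Dict String Int) :
    fcfAStep1 d = fun parts code => parts ++ fcfE d code := by
  funext parts code
  simp only [fcfAStep1, fcfE]
  split <;> simp

lemma fcfG_nil_of_not_key (i : Nat) (code : String)
    (hiff : ∀ c, fcfRkN c = i ↔ c = code)
    (xs : List (String × Int)) (h : code ∉ xs.map Prod.fst) : fcfG i xs = [] := by
  simp only [fcfG, List.map_eq_nil_iff, List.filter_eq_nil_iff]
  intro p hp
  simp only [Bool.and_eq_true, decide_eq_true_eq, not_and]
  intro _ hr
  exact h (List.mem_map.mpr ⟨p, hp, (hiff p.1).mp hr⟩)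

lemma fcfE_eq_G (code : String) (i : Nat) (hiff : ∀ c, fcfRkN c = i ↔ c = code) :
    ∀ xs : List (String × Int), (xs.map Prod.fst).Nodup →
    fcfE (PySem.Dict.mk xs) code = fcfG i xs := by
  intro xs
  induction xs with
  | nil => intro _; simp [fcfE, fcfG, PySem.Dict.getD, PySem.Dict.get?]
  | cons p xs ih =>
    obtain ⟨k, v⟩ := p
    intro hnd
    rw [List.map_cons, List.nodup_cons] at hnd
    obtain ⟨hnotin, hnd'⟩ := hnd
    by_cases hk : k = code
    · have hget : (PySem.Dict.mk ((k, v) :: xs)).getD code 0 = v := by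
        simp [PySem.Dict.getD, PySem.Dict.get?_mk_cons, hk]
      rw [fcfG_cons, fcfG_nil_of_not_key i code hiff xs (by simpa [hk] using hnotin)]
      simp only [fcfE, hget, (hiff k).mpr hk, and_true, List.append_nil]
      split_ifs with h <;> simp [fcfFmt, hk]
    · have hget : (PySem.Dict.mk ((k, v) :: xs)).getD code 0 = (PySem.Dict.mk xs).getD code 0 := by
        have : (k == code) = false := by simp [hk]
        simp [PySem.Dict.getD, PySem.Dict.get?_mk_cons, this]
      have hri : ¬ (fcfRkN k = i) := fun h => hk ((hiff k).mp h)
      rw [fcfG_cons]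
      simp only [fcfE, hget, hri, and_false, if_false, List.nil_append]
      exact ih hnd'

lemma fcf_iff0 : ∀ c, fcfRkN c = 0 ↔ c = "GC" := by
  intro c; rw [fcfRkN_eq]; split_ifs <;> simp_all
lemma fcf_iff1 : ∀ c, fcfRkN c = 1 ↔ c = "GR" := by
  intro c; rw [fcfRkN_eq]; split_ifs <;> simp_all
lemma fcf_iff2 : ∀ c, fcfRkN c = 2 ↔ c = "GS" := by
  intro c; rw [fcfRkN_eq]; split_ifs <;> simp_all
lemma fcf_iff3 : ∀ c, fcfRkN c = 3 ↔ c = "AC" := by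
  intro c; rw [fcfRkN_eq]; split_ifs <;> simp_all
lemma fcf_iff4 : ∀ c, fcfRkN c = 4 ↔ c = "AR" := by
  intro c; rw [fcfRkN_eq]; split_ifs <;> simp_all
lemma fcf_iff5 : ∀ c, fcfRkN c = 5 ↔ c = "AS" := by
  intro c; rw [fcfRkN_eq]; split_ifs <;> simp_all
lemma fcf_iff6 : ∀ c, fcfRkN c = 6 ↔ c = "RC" := by
  intro c; rw [fcfRkN_eq]; split_ifs <;> simp_all
lemma fcf_iff7 : ∀ c, fcfRkN c = 7 ↔ c = "RR" := by
  intro c; rw [fcfRkN_eq]; split_ifs <;> simp_all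
lemma fcf_iff8 : ∀ c, fcfRkN c = 8 ↔ c = "RS" := by
  intro c; rw [fcfRkN_eq]; split_ifs <;> simp_all

lemma fcf_iff9 : ∀ c, fcfRkN c = 9 ↔ c ∉ fcfPriority := by
  intro c; rw [fcfRkN_eq]; split_ifs <;> simp_all [fcfPriority]

-- A's first loop = buckets 0..8
lemma fcf_afold1 (xs : List (String × Int)) (hnd : (xs.map Prod.fst).Nodup) :
    fcfPriority.foldl (fcfAStep1 (PySem.Dict.mk xs)) [] =
      fcfG 0 xs ++ fcfG 1 xs ++ fcfG 2 xs ++ fcfG 3 xs ++ fcfG 4 xs ++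
      fcfG 5 xs ++ fcfG 6 xs ++ fcfG 7 xs ++ fcfG 8 xs := by
  rw [fcfAStep1_eq, PySem.List.foldl_append_eq_flatMap]
  show fcfPriority.flatMap (fcfE (PySem.Dict.mk xs)) = _
  rw [show fcfPriority.flatMap (fcfE (PySem.Dict.mk xs)) =
      fcfE (PySem.Dict.mk xs) "GC" ++ fcfE (PySem.Dict.mk xs) "GR" ++ fcfE (PySem.Dict.mk xs) "GS" ++
      fcfE (PySem.Dict.mk xs) "AC" ++ fcfE (PySem.Dict.mk xs) "AR" ++ fcfE (PySem.Dict.mk xs) "AS" ++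
      fcfE (PySem.Dict.mk xs) "RC" ++ fcfE (PySem.Dict.mk xs) "RR" ++ fcfE (PySem.Dict.mk xs) "RS" from by
    simp [fcfPriority, List.flatMap, List.append_assoc]]
  rw [fcfE_eq_G "GC" 0 fcf_iff0 xs hnd, fcfE_eq_G "GR" 1 fcf_iff1 xs hnd,
      fcfE_eq_G "GS" 2 fcf_iff2 xs hnd, fcfE_eq_G "AC" 3 fcf_iff3 xs hnd,
      fcfE_eq_G "AR" 4 fcf_iff4 xs hnd, fcfE_eq_G "AS" 5 fcf_iff5 xs hnd,
      fcfE_eq_G "RC" 6 fcf_iff6 xs hnd, fcfE_eq_G "RR" 7 fcf_iff7 xs hnd,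
      fcfE_eq_G "RS" 8 fcf_iff8 xs hnd]

-- A's second loop = bucket 9
lemma fcf_filter9 (xs : List (String × Int)) :
    xs.filter (fun x => decide (x.1 ∉ fcfPriority ∧ x.2 > 0)) =
      xs.filter (fun p => decide (p.2 > 0) && decide (fcfRkN p.1 = 9)) := by
  apply List.filter_congr
  intro p _
  by_cases h2 : p.2 > 0 <;> by_cases h9 : fcfRkN p.1 = 9
  · simp [h2, h9, (fcf_iff9 p.1).mp h9]
  · have hmem : p.1 ∈ fcfPriority := not_not.mp (fun hn => h9 ((fcf_iff9 p.1).mpr hn))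
    simp [h2, h9, hmem]
  · simp [h2]
  · simp [h2]

lemma fcf_afold2 (xs : List (String × Int)) (acc : List String) :
    xs.foldl fcfAStep2 acc = acc ++ fcfG 9 xs := by
  unfold fcfAStep2
  rw [PySem.List.foldl_append_ite (fun p : String × Int => p.1 ∉ fcfPriority ∧ p.2 > 0)
        (fun p => p.1 ++ PySem.Int.toStr p.2)]
  rw [fcf_filter9]
  rfl

-- ===== VERDICT (by name: the statement is the Claim_ definition above) =====
theorem format_composite_flow_spec : Claim_equal_format_composite_flow := by
  intro xs _ hpre
  unfold Spec_format_composite_flow format_composite_flow format_composite_flow_alt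
  by_cases hnil : xs = []
  · simp [hnil]
  · simp only [hnil, if_false]
    rw [show (List.replicate 10 [] : List (List String)) = [[],[],[],[],[],[],[],[],[],[]] from rfl]
    rw [fcf_bfold, fcf_afold2, fcf_afold1 xs hpre]
    simp [List.append_assoc]
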